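-- pv_equiv track=rewrite | github.com/pureslurp/DKPGA | Legacy/pga_dk_scoring.py | streaks_and_bonuses
-- ===== SOURCE A (Python) =====
-- def streaks_and_bonuses(r1, r2, r3, r4, par):
--     '''
--     Streak of 3 birdies or better = 3
--     Bogey Free Round = 3
--     All 4 Rounds Under 70 Strokes = 5
--     '''
--     try:
--         if r4 is not None:
--             tot1 = par + sum(r1)
--             tot2 = par + sum(r2)
--             tot3 = par + sum(r3)
--             tot4 = par + sum(r4)
--             r_array = [r1, r2, r3, r4]
--
--             if tot1 < 70 and tot2 < 70 and tot3 < 70 and tot4 < 70: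
--                 under_70_pts = 5
--             else:
--                 under_70_pts = 0
--         elif r3 is not None:
--             tot1 = par + sum(r1)
--             tot2 = par + sum(r2)
--             tot3 = par + sum(r3)
--             r_array = [r1, r2, r3]
--
--             if tot1 < 70 and tot2 < 70 and tot3 < 70:
--                 under_70_pts = 5
--             else:
--                 under_70_pts = 0
--         else:
--             tot1 = par + sum(r1)
--             tot2 = par + sum(r2)
--             r_array = [r1, r2]
--
--             if tot1 < 70 and tot2 < 70:
--                 under_70_pts = 5
--             else:
--                 under_70_pts = 0
--
--         bogey_free = 0
--         for r in r_array:
--             for h in r: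
--                 if h > 0:
--                     bogey_streak_pts = 0
--                     break
--                 else:
--                     bogey_streak_pts = 3
--             bogey_free += bogey_streak_pts
--
--         birdie_streak = 0
--         for r in r_array:
--             l1 = False
--             l2 = False
--             for h in r:
--                 if h < 0 and l1 == False:
--                     l1 = True
--                 elif h < 0 and l1 == True and l2 == False:
--                     l2 = True
--                 elif h < 0 and l1 == True and l2 == True:
--                     birdie_streak += 3
--                     l1 = False
--                     l2 = False
--                 else:
--                     l1 = False
--                     l2 = False
--         return bogey_free + birdie_streak + under_70_pts
--     except:
--         return 0
-- ===== SOURCE B (Python) =====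
-- # B: staged, data-driven rewrite: validate the scorecard, build the active-round
-- # list once, score each bonus with its own comprehension pass, and compute the
-- # birdie streak by two-pointer run-length decomposition (3 per completed trio).
-- def birdie_points(r):
--     """3 fantasy points per completed trio of consecutive sub-par holes:
--     scan the round with two indices, and score each maximal run of sub-par
--     holes in closed form as 3 * (run_length // 3)."""
--     pts = 0
--     i, n = 0, len(r)
--     while i < n:
--         j = i
--         while j < n and r[j] < 0:
--             j += 1
--         pts += (j - i) // 3 * 3
--         i = j + 1
--     return pts
--
-- def streaks_and_bonuses(r1, r2, r3, r4, par):
--     '''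
--     Streak of 3 birdies or better = 3
--     Bogey Free Round = 3
--     All 4 Rounds Under 70 Strokes = 5
--     '''
--     if r3 is None and r4 is not None:
--         return 0  # inconsistent scorecard: a 4th round cannot exist without a 3rd
--     rounds = [r for r in (r1, r2, r3, r4) if r is not None]
--     pts = 5 if all(par + sum(r) < 70 for r in rounds) else 0
--     for r in rounds:
--         if all(h <= 0 for h in r):
--             pts += 3
--         pts += birdie_points(r)
--     return pts
-- ===== Notes on version B (the rewrite author's own statement) =====
-- stated objective: simpler
-- what changed: Replaces the three copy-pasted if/elif branches, the break-driven bogey loop and the two-boolean birdie state machine by an up-front scorecard validity check plus staged data-driven passes over one active-round list: all()/sum() comprehensions for the under-70 and bogey-free bonuses, and the birdie streak computed by a two-pointer run-length scan that scores each maximal sub-par run in closed form as 3*(length//3) instead of a per-hole state machine.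
-- intended difference: On inputs where some present round is empty A returns 0 from a swallowed NameError (empty first round) or re-adds the previous round's stale bogey-free points (leftover loop state), while B scores each present round on its own (an empty round is vacuously bogey-free), which is the intended scoring. — e.g. on streaks_and_bonuses([], [0], none, none, 0): A returns 0, B returns 11
import Mathlib
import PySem

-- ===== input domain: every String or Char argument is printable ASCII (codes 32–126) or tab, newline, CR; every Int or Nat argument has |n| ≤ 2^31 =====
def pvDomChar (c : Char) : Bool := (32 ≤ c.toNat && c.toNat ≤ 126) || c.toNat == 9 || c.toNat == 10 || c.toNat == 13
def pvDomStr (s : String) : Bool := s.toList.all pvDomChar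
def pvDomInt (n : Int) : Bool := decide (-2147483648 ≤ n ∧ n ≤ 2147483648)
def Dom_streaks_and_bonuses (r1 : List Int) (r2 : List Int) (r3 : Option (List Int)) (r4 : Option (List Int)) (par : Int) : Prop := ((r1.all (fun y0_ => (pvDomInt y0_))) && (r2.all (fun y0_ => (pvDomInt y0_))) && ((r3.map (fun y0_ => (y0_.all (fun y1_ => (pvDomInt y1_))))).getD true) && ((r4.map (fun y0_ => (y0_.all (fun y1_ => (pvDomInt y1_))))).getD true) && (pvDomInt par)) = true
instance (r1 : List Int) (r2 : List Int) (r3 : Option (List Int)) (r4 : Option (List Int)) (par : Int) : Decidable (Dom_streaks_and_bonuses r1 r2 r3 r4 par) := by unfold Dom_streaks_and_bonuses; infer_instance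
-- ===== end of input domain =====

-- B rewrites A data-driven: scorecard validation, one active-round list, comprehension passes
-- for the under-70 and bogey-free bonuses, and the birdie streak by two-pointer run-length
-- decomposition (3*(len//3) per maximal sub-par run). Equality of RETURN values only (no
-- argument is mutated).

-- ===== PORT A =====

-- inner bogey loop of A: value of bogey_streak_pts after the round ('break' returns
-- immediately); the incoming Option is the variable's previous binding (none = still
-- unbound, reading it raises NameError)
def pvA_bogeyPts : List Int → Option Int → Option Int
  | [], pts => pts
  | h :: t, _ => if h > 0 then some 0 else pvA_bogeyPts t (some 3)

-- outer bogey loop: none = NameError escaped (caught by A's bare except)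
def pvA_bogeyLoop : List (List Int) → Int → Option Int → Option Int
  | [], acc, _ => some acc
  | r :: rs, acc, pts =>
      match pvA_bogeyPts r pts with
      | none => none
      | some p => pvA_bogeyLoop rs (acc + p) (some p)

-- A's birdie state machine with the two boolean latches l1 l2
def pvA_birdieRound : List Int → Int → Bool → Bool → Int
  | [], acc, _, _ => acc
  | h :: t, acc, l1, l2 =>
      if h < 0 && !l1 then pvA_birdieRound t acc true l2
      else if h < 0 && l1 && !l2 then pvA_birdieRound t acc l1 true
      else if h < 0 && l1 && l2 then pvA_birdieRound t (acc + 3) false false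
      else pvA_birdieRound t acc false false

def pvA_body (r_array : List (List Int)) (under_70_pts : Int) : Int :=
  match pvA_bogeyLoop r_array 0 none with
  | none => 0   -- NameError caught by A's bare except
  | some bogey_free =>
      bogey_free + r_array.foldl (fun acc r => pvA_birdieRound r acc false false) 0 + under_70_pts

def streaks_and_bonuses (r1 : List Int) (r2 : List Int) (r3 : Option (List Int)) (r4 : Option (List Int)) (par : Int) : Int :=
  match r4 with
  | some r4v =>
      match r3 with
      | none => 0   -- sum(None): TypeError caught by A's bare except
      | some r3v =>
          pvA_body [r1, r2, r3v, r4v]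
            (if par + r1.sum < 70 ∧ par + r2.sum < 70 ∧ par + r3v.sum < 70 ∧ par + r4v.sum < 70 then 5 else 0)
  | none =>
      match r3 with
      | some r3v =>
          pvA_body [r1, r2, r3v]
            (if par + r1.sum < 70 ∧ par + r2.sum < 70 ∧ par + r3v.sum < 70 then 5 else 0)
      | none =>
          pvA_body [r1, r2]
            (if par + r1.sum < 70 ∧ par + r2.sum < 70 then 5 else 0)

-- ===== PORT B =====

-- length of the leading run of sub-par holes (B's inner while loop)
def pvB_runLen : List Int → Nat
  | [] => 0
  | h :: t => if h < 0 then pvB_runLen t + 1 else 0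

-- B's birdie_points: peel the leading sub-par run, score it 3*(k//3), skip the
-- hole that ended it, recurse on the remainder
def pvB_birdie : List Int → Int
  | [] => 0
  | h :: t =>
      let k := pvB_runLen (h :: t)
      ((k / 3 * 3 : Nat) : Int) + pvB_birdie ((h :: t).drop (k + 1))
termination_by r => r.length
decreasing_by simp only [List.length_drop, List.length_cons]; omega

def streaks_and_bonuses_alt (r1 : List Int) (r2 : List Int) (r3 : Option (List Int)) (r4 : Option (List Int)) (par : Int) : Int :=
  if r3 = none ∧ r4 ≠ none then 0   -- inconsistent scorecard: a 4th round cannot exist without a 3rd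
  else
  let rounds := ([some r1, some r2, r3, r4] : List (Option (List Int))).filterMap id
  let pts0 : Int := if rounds.all (fun r => decide (par + r.sum < 70)) then 5 else 0
  rounds.foldl (fun pts r =>
    (if r.all (fun h => decide (h ≤ 0)) then pts + 3 else pts) + pvB_birdie r) pts0

-- ===== PRECONDITION & SPEC =====
-- On inputs where some present round is empty A returns 0 from a swallowed NameError (empty
-- first round) or re-adds the previous round's stale bogey-free points (leftover loop state),
-- while B scores each present round on its own (an empty round is vacuously bogey-free),
-- which is the intended scoring.
def D_streaks_and_bonuses (r1 : List Int) (r2 : List Int) (r3 : Option (List Int)) (r4 : Option (List Int)) (par : Int) : Prop :=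
  r1 = [] ∨ r2 = [] ∨ r3 = some [] ∨ r4 = some []
instance (r1 : List Int) (r2 : List Int) (r3 : Option (List Int)) (r4 : Option (List Int)) (par : Int) : Decidable (D_streaks_and_bonuses r1 r2 r3 r4 par) := by unfold D_streaks_and_bonuses; infer_instance

def Spec_streaks_and_bonuses (r1 : List Int) (r2 : List Int) (r3 : Option (List Int)) (r4 : Option (List Int)) (par : Int) (out : Int) : Prop := ¬ D_streaks_and_bonuses r1 r2 r3 r4 par → out = streaks_and_bonuses_alt r1 r2 r3 r4 par
instance (r1 : List Int) (r2 : List Int) (r3 : Option (List Int)) (r4 : Option (List Int)) (par : Int) (out : Int) : Decidable (Spec_streaks_and_bonuses r1 r2 r3 r4 par out) := by unfold Spec_streaks_and_bonuses; infer_instance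

def pvDiffWitness_streaks_and_bonuses : List Int × List Int × Option (List Int) × Option (List Int) × Int := ([], [0], none, none, 0)
def pvDiffWitnessOut_streaks_and_bonuses : Int × Int := (0, 11)

-- ===== CLAIM =====
def Claim_unchanged_streaks_and_bonuses : Prop := ∀ (r1 : List Int) (r2 : List Int) (r3 : Option (List Int)) (r4 : Option (List Int)) (par : Int), Dom_streaks_and_bonuses r1 r2 r3 r4 par → Spec_streaks_and_bonuses r1 r2 r3 r4 par (streaks_and_bonuses r1 r2 r3 r4 par)
def Claim_changed_streaks_and_bonuses : Prop := Dom_streaks_and_bonuses (pvDiffWitness_streaks_and_bonuses.1) (pvDiffWitness_streaks_and_bonuses.2.1) (pvDiffWitness_streaks_and_bonuses.2.2.1) (pvDiffWitness_streaks_and_bonuses.2.2.2.1) (pvDiffWitness_streaks_and_bonuses.2.2.2.2) ∧ D_streaks_and_bonuses (pvDiffWitness_streaks_and_bonuses.1) (pvDiffWitness_streaks_and_bonuses.2.1) (pvDiffWitness_streaks_and_bonuses.2.2.1) (pvDiffWitness_streaks_and_bonuses.2.2.2.1) (pvDiffWitness_streaks_and_bonuses.2.2.2.2) ∧ streaks_and_bonuses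 (pvDiffWitness_streaks_and_bonuses.1) (pvDiffWitness_streaks_and_bonuses.2.1) (pvDiffWitness_streaks_and_bonuses.2.2.1) (pvDiffWitness_streaks_and_bonuses.2.2.2.1) (pvDiffWitness_streaks_and_bonuses.2.2.2.2) = pvDiffWitnessOut_streaks_and_bonuses.1 ∧ streaks_and_bonuses_alt (pvDiffWitness_streaks_and_bonuses.1) (pvDiffWitness_streaks_and_bonuses.2.1) (pvDiffWitness_streaks_and_bonuses.2.2.1) (pvDiffWitness_streaks_and_bonuses.2.2.2.1) (pvDiffWitness_streaks_and_bonuses.2.2.2.2) = pvDiffWitnessOut_streaks_and_bonuses.2 ∧ pvDiffWitnessOut_streaks_and_bonuses.1 ≠ pvDiffWitnessOut_streaks_and_bonuses.2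

-- ===== LEMMAS AND PROOFS =====

-- a nonempty round's bogey points do not depend on the incoming binding
theorem pvA_bogeyPts_cons (h : Int) (t : List Int) (prev : Option Int) :
    pvA_bogeyPts (h :: t) prev = some (if (h :: t).all (fun x => decide (x ≤ 0)) then 3 else 0) := by
  induction t generalizing h prev with
  | nil =>
      simp only [pvA_bogeyPts, List.all_cons, List.all_nil, Bool.and_true]
      by_cases hp : h > 0
      · have hd : decide (h ≤ 0) = false := by simp; omega
        simp [hp, hd]
      · have hd : decide (h ≤ 0) = true := by simp; omega
        simp [hp, hd]
  | cons h' t' ih =>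
      have e : pvA_bogeyPts (h :: h' :: t') prev
          = if h > 0 then some 0 else pvA_bogeyPts (h' :: t') (some 3) := rfl
      rw [e]
      by_cases hp : h > 0
      · have hd : decide (h ≤ 0) = false := by simp; omega
        simp [hp, hd, List.all_cons]
      · have hd : decide (h ≤ 0) = true := by simp; omega
        rw [if_neg hp, ih h' (some 3)]
        simp [List.all_cons, hd]

theorem pvA_bogeyLoop_eq (rs : List (List Int)) (acc : Int) (prev : Option Int)
    (hne : ∀ r ∈ rs, r ≠ []) :
    pvA_bogeyLoop rs acc prev =
      some (rs.foldl (fun a r => if r.all (fun h => decide (h ≤ 0)) then a + 3 else a) acc) := by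
  induction rs generalizing acc prev with
  | nil => simp [pvA_bogeyLoop]
  | cons r rs ih =>
      have hr : r ≠ [] := hne r (by simp)
      obtain ⟨h, t, rfl⟩ : ∃ h t, r = h :: t := by
        cases r with | nil => exact absurd rfl hr | cons a b => exact ⟨a, b, rfl⟩
      have hne' : ∀ x ∈ rs, x ≠ [] := fun x hx => hne x (by simp [hx])
      cases hc : (h :: t).all (fun x => decide (x ≤ 0)) with
      | true =>
          simp only [pvA_bogeyLoop, pvA_bogeyPts_cons, hc, if_true, List.foldl_cons]
          exact ih _ _ hne'
      | false =>
          simp only [pvA_bogeyLoop, pvA_bogeyPts_cons, hc, Bool.false_eq_true, if_false,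
            List.foldl_cons, add_zero]
          exact ih _ _ hne'

-- common birdie spec: score of r with c pending consecutive birdies (c < 3)
def pvG : Nat → List Int → Int
  | _, [] => 0
  | c, h :: t => if h < 0 then (if c == 2 then 3 + pvG 0 t else pvG (c+1) t) else pvG 0 t

-- A's two-latch state machine computes pvG (states FF/TF/TT ↔ 0/1/2)
theorem pvA_birdie_G (r : List Int) :
    (∀ acc, pvA_birdieRound r acc false false = acc + pvG 0 r) ∧
    (∀ acc, pvA_birdieRound r acc true false = acc + pvG 1 r) ∧
    (∀ acc, pvA_birdieRound r acc true true = acc + pvG 2 r) := by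
  induction r with
  | nil => simp [pvA_birdieRound, pvG]
  | cons h t ih =>
      obtain ⟨i0, i1, i2⟩ := ih
      refine ⟨?_, ?_, ?_⟩ <;> intro acc <;>
        by_cases hb : h < 0 <;>
        simp [pvA_birdieRound, pvG, hb, i0, i1, i2] <;> ring

-- pvG over the leading sub-par run in closed form
theorem pvG_run (r : List Int) : ∀ c, c < 3 →
    pvG c r = (((c + pvB_runLen r) / 3 * 3 : Nat) : Int) + pvG 0 (r.drop (pvB_runLen r + 1)) := by
  induction r with
  | nil =>
      intro c hc
      simp only [pvG, pvB_runLen, List.drop_nil]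
      simp
      omega
  | cons h t ih =>
      intro c hc
      by_cases hb : h < 0
      · have hk : pvB_runLen (h :: t) = pvB_runLen t + 1 := by simp [pvB_runLen, hb]
        by_cases h2 : c = 2
        · subst h2
          have := ih 0 (by omega)
          simp only [pvG, hb, if_true, beq_self_eq_true, hk, this]
          have harith : (2 + (pvB_runLen t + 1)) / 3 * 3 = pvB_runLen t / 3 * 3 + 3 := by omega
          rw [harith]
          push_cast
          simp [List.drop_succ_cons]
          ring
        · have hbeq : (c == 2) = false := by simp [h2]
          have := ih (c + 1) (by omega)
          simp only [pvG, hb, if_true, hbeq, Bool.false_eq_true, if_false, hk, this]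
          have harith : (c + (pvB_runLen t + 1)) = (c + 1 + pvB_runLen t) := by omega
          rw [harith]
          simp [List.drop_succ_cons]
      · have hk : pvB_runLen (h :: t) = 0 := by simp [pvB_runLen, hb]
        have hc3 : (c + 0) / 3 = 0 := by omega
        simp only [pvG, hb, if_false, hk, hc3, List.drop_succ_cons, List.drop_zero]
        simp

-- B's run-peeling recursion computes pvG 0
theorem pvB_birdie_G (r : List Int) : pvB_birdie r = pvG 0 r := by
  have main : ∀ n (r : List Int), r.length ≤ n → pvB_birdie r = pvG 0 r := by
    intro n
    induction n with
    | zero =>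
        intro r hr
        have : r = [] := by cases r <;> simp_all
        subst this; simp [pvB_birdie, pvG]
    | succ n ih =>
        intro r hr
        cases r with
        | nil => simp [pvB_birdie, pvG]
        | cons h t =>
            rw [pvB_birdie, pvG_run (h :: t) 0 (by omega)]
            have hlen : ((h :: t).drop (pvB_runLen (h :: t) + 1)).length ≤ n := by
              simp only [List.length_drop, List.length_cons] at *
              omega
            rw [ih _ hlen]
            simp
  exact main r.length r le_rfl

-- merge A's two staged folds into B's single combined fold
theorem pv_fold_merge (rs : List (List Int)) : ∀ (u a b : Int),
    (rs.foldl (fun x r => if r.all (fun h => decide (h ≤ 0)) then x + 3 else x) a)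
      + (rs.foldl (fun x r => pvA_birdieRound r x false false) b) + u
    = rs.foldl (fun pts r =>
        (if r.all (fun h => decide (h ≤ 0)) then pts + 3 else pts) + pvB_birdie r) (u + a + b) := by
  induction rs with
  | nil => intro u a b; simp [List.foldl]; ring
  | cons r rs ih =>
      intro u a b
      simp only [List.foldl_cons]
      rw [ih]
      congr 1
      rw [(pvA_birdie_G r).1 b, pvB_birdie_G]
      by_cases hc : r.all (fun h => decide (h ≤ 0)) <;> simp [hc] <;> ring

theorem pv_body_eq (rs : List (List Int)) (u : Int) (hne : ∀ r ∈ rs, r ≠ []) :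
    pvA_body rs u = rs.foldl (fun pts r =>
        (if r.all (fun h => decide (h ≤ 0)) then pts + 3 else pts) + pvB_birdie r) u := by
  simp only [pvA_body, pvA_bogeyLoop_eq rs 0 none hne]
  have h := pv_fold_merge rs u 0 0
  rw [show u + (0:ℤ) + 0 = u by ring] at h
  exact h

-- ===== VERDICT =====
theorem streaks_and_bonuses_spec : Claim_unchanged_streaks_and_bonuses := by
  intro r1 r2 r3 r4 par _ hD
  unfold D_streaks_and_bonuses at hD
  push_neg at hD
  obtain ⟨h1, h2, h3, h4⟩ := hD
  unfold streaks_and_bonuses streaks_and_bonuses_alt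
  cases r4 with
  | none =>
      cases r3 with
      | none =>
          have hne : ∀ r ∈ [r1, r2], r ≠ [] := by
            intro r hr
            simp only [List.mem_cons, List.not_mem_nil, or_false] at hr
            rcases hr with rfl | rfl
            · exact h1
            · exact h2
          dsimp only
          rw [pv_body_eq _ _ hne]
          simp [List.filterMap, List.all_cons]
      | some r3v =>
          have hne : ∀ r ∈ [r1, r2, r3v], r ≠ [] := by
            intro r hr
            simp only [List.mem_cons, List.not_mem_nil, or_false] at hr
            rcases hr with rfl | rfl | rfl
            · exact h1
            · exact h2
            · exact fun he => h3 (by rw [he])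
          dsimp only
          rw [pv_body_eq _ _ hne]
          simp [List.filterMap, List.all_cons]
  | some r4v =>
      cases r3 with
      | none => simp
      | some r3v =>
          have hne : ∀ r ∈ [r1, r2, r3v, r4v], r ≠ [] := by
            intro r hr
            simp only [List.mem_cons, List.not_mem_nil, or_false] at hr
            rcases hr with rfl | rfl | rfl | rfl
            · exact h1
            · exact h2
            · exact fun he => h3 (by rw [he])
            · exact fun he => h4 (by rw [he])
          dsimp only
          rw [pv_body_eq _ _ hne]
          simp [List.filterMap, List.all_cons]

theorem streaks_and_bonuses_changed : Claim_changed_streaks_and_bonuses := by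
  unfold Claim_changed_streaks_and_bonuses
  refine ⟨by decide, by decide, by decide, ?_, by decide⟩
  show streaks_and_bonuses_alt [] [0] none none 0 = 11
  simp [streaks_and_bonuses_alt, pvB_birdie_G, pvG]
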